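-- pv_equiv track=rewrite | github.com/Athos-0day/Introduction-to-ciphers | CryptanalisysNgram.py | digram_frequency_analysis
-- ===== SOURCE A (Python) =====
-- def digram_frequency_analysis(text: str) -> dict:
--     # Initialize a dictionary to store digram frequencies
--     digram_freq = {}
--
--     # Convert text to uppercase and remove non-alphabetic characters
--     text_upper = ''.join([char.upper() for char in text if char.isalpha()])
--
--     # Extract digrams and count their frequencies
--     for i in range(len(text_upper) - 1):
--         digram = text_upper[i:i+2]  # Get two consecutive letters
--         if digram in digram_freq:
--             digram_freq[digram] += 1
--         else:
--             digram_freq[digram] = 1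
--
--     return digram_freq
-- ===== SOURCE B (Python) =====
-- def digram_frequency_analysis(text: str) -> dict:
--     # One fused pass: no intermediate cleaned string, no index slicing.
--     digram_freq = {}
--     prev = None
--     for ch in text:
--         if not ch.isalpha():
--             continue
--         c = ch.upper()
--         if prev is not None:
--             key = prev + c
--             digram_freq[key] = digram_freq.get(key, 0) + 1
--         prev = c
--     return digram_freq
-- ===== Notes on version B (the rewrite author's own statement) =====
-- stated objective: alternative
-- what changed: Replaces A's two-phase clean-then-index-slice approach (build an uppercase filtered string, then loop over indices slicing out pairs) with a single fused pass over the original text that keeps a running previous-letter state and increments the count as each alphabetic character arrives.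
import Mathlib
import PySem

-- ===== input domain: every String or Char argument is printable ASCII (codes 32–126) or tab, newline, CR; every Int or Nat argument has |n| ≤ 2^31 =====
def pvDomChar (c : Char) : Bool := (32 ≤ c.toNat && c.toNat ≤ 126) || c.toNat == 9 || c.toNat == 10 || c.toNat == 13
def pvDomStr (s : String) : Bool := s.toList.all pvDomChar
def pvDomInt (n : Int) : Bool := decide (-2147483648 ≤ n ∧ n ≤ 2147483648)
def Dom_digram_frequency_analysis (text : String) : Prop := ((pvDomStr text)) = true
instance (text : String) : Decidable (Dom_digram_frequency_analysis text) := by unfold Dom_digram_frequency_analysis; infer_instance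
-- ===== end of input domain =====

-- B fuses A's clean-then-index-slice two-phase counting into one pass over the
-- original text with a running previous-letter state (alternative decomposition).


-- ===== PORT A =====
def digram_frequency_analysis (text : String) : List (String × Int) :=
  -- text_upper = ''.join([char.upper() for char in text if char.isalpha()])
  let text_upper : List Char :=
    (text.toList.filter (fun c => PySem.Chars.isalpha c)).map PySem.Chars.upperChar
  -- for i in range(len(text_upper) - 1): …
  let digram_freq :=
    (PySem.List.pyRange 0 ((text_upper.length : Int) - 1) 1).foldl
      (fun (d : PySem.Dict String Int) i =>
        let digram := String.ofList (PySem.List.slice text_upper (some i) (some (i + 2)))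
        if d.contains digram then d.insert digram (d.getD digram 0 + 1)
        else d.insert digram 1)
      PySem.Dict.empty
  digram_freq.items

-- ===== PORT B =====
def digram_frequency_analysis_alt (text : String) : List (String × Int) :=
  -- single pass, state = (digram_freq, prev)
  let st :=
    text.toList.foldl
      (fun (st : PySem.Dict String Int × Option Char) ch =>
        if PySem.Chars.isalpha ch then
          let c := PySem.Chars.upperChar ch
          let d :=
            match st.2 with
            | none => st.1
            | some p => st.1.modify (String.ofList [p, c]) 0 (· + 1)
          (d, some c)
        else st)
      (PySem.Dict.empty, none)
  st.1.items

-- ===== PRECONDITION & SPEC =====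
def Spec_digram_frequency_analysis (text : String) (out : List (String × Int)) : Prop := out = digram_frequency_analysis_alt text
instance (text : String) (out : List (String × Int)) : Decidable (Spec_digram_frequency_analysis text out) := by unfold Spec_digram_frequency_analysis; infer_instance

-- ===== CLAIM (what is proved, stated in full; the proofs are below) =====
def Claim_equal_digram_frequency_analysis : Prop := ∀ (text : String), Dom_digram_frequency_analysis text → Spec_digram_frequency_analysis text (digram_frequency_analysis text)

-- ===== LEMMAS AND PROOFS =====

-- increment helper: d[s] = d.get(s, 0) + 1
def pvInc (d : PySem.Dict String Int) (s : String) : PySem.Dict String Int :=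
  d.modify s 0 (· + 1)

-- the list of consecutive digrams of a cleaned character list
def pvDigs : List Char → List String
  | [] => []
  | [_] => []
  | a :: b :: rest => String.ofList [a, b] :: pvDigs (b :: rest)

-- A's loop body equals pvInc
theorem pvStepA_eq (d : PySem.Dict String Int) (s : String) :
    (if d.contains s then d.insert s (d.getD s 0 + 1) else d.insert s 1) = pvInc d s := by
  unfold pvInc
  by_cases h : d.contains s
  · simp [h, PySem.Dict.modify]
  · simp only [Bool.not_eq_true] at h
    simp [h, PySem.Dict.modify, PySem.Dict.getD_of_not_contains]

-- prev-state fold over the cleaned list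
def pvPairFold : List Char → PySem.Dict String Int → Option Char → PySem.Dict String Int
  | [], d, _ => d
  | c :: cs, d, none => pvPairFold cs d (some c)
  | c :: cs, d, some p => pvPairFold cs (pvInc d (String.ofList [p, c])) (some c)

theorem pvPairFold_some (L : List Char) :
    ∀ (d : PySem.Dict String Int) (c : Char),
      pvPairFold L d (some c) = (pvDigs (c :: L)).foldl pvInc d := by
  induction L with
  | nil => intro d c; simp [pvPairFold, pvDigs]
  | cons b rest ih =>
      intro d c
      simp [pvPairFold, pvDigs, ih]

theorem pvPairFold_none (L : List Char) (d : PySem.Dict String Int) :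
    pvPairFold L d none = (pvDigs L).foldl pvInc d := by
  cases L with
  | nil => simp [pvPairFold, pvDigs]
  | cons c cs => simp [pvPairFold, pvPairFold_some]

-- B's fold equals pvPairFold over the cleaned characters
theorem pvB_fold (cs : List Char) :
    ∀ (d : PySem.Dict String Int) (p : Option Char),
      (cs.foldl
        (fun (st : PySem.Dict String Int × Option Char) ch =>
          if PySem.Chars.isalpha ch then
            let c := PySem.Chars.upperChar ch
            let d :=
              match st.2 with
              | none => st.1
              | some q => st.1.modify (String.ofList [q, c]) 0 (· + 1)
            (d, some c)
          else st)
        (d, p)).1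
      = pvPairFold ((cs.filter (fun c => PySem.Chars.isalpha c)).map PySem.Chars.upperChar) d p := by
  induction cs with
  | nil => intro d p; simp [pvPairFold]
  | cons ch rest ih =>
      intro d p
      by_cases h : PySem.Chars.isalpha ch
      · cases p with
        | none => simp [h, ih, pvPairFold]
        | some q => simp [h, ih, pvPairFold, pvInc]
      · simp [h, ih]

-- slicing two characters: L[i:i+2] for a natural i
theorem pvSlice_two (L : List Char) (k : Nat) :
    PySem.List.slice L (some (k : Int)) (some ((k : Int) + 2)) = (L.drop k).take 2 := by
  have h : ((k : Int) + 2) = (((k + 2 : Nat) : Int)) := by push_cast; ring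
  rw [h, PySem.List.slice_natCast]
  congr 1
  omega

-- A's index loop equals a fold over the digram list
theorem pvA_fold (L : List Char) :
    ∀ (d0 : PySem.Dict String Int),
      (PySem.List.pyRange 0 ((L.length : Int) - 1) 1).foldl
        (fun d i => pvInc d (String.ofList (PySem.List.slice L (some i) (some (i + 2))))) d0
      = (pvDigs L).foldl pvInc d0 := by
  induction L with
  | nil =>
      intro d0
      rw [PySem.List.pyRange_one_eq_nil (by simp)]
      simp [pvDigs]
  | cons a L' ih =>
      intro d0
      cases L' with
      | nil =>
          rw [PySem.List.pyRange_one_eq_nil (by simp)]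
          simp [pvDigs]
      | cons b rest =>
          have hlen : ((a :: b :: rest).length : Int) - 1 = ((rest.length : Int) + 1) := by
            simp only [List.length_cons]; push_cast; ring
          rw [hlen, PySem.List.pyRange_one_cons (by positivity)]
          simp only [List.foldl_cons, zero_add]
          -- first iteration: slice L 0 2 = [a, b]
          have h0 : PySem.List.slice (a :: b :: rest) (some (0 : Int)) (some (2 : Int))
              = [a, b] := by
            have := pvSlice_two (a :: b :: rest) 0
            simpa using this
          rw [h0]
          -- remaining iterations: shift the range by one
          have hshift :
              (PySem.List.pyRange 1 ((rest.length : Int) + 1) 1).foldl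
                (fun d i => pvInc d (String.ofList (PySem.List.slice (a :: b :: rest) (some i) (some (i + 2)))))
                (pvInc d0 (String.ofList [a, b]))
              = (PySem.List.pyRange 0 (((b :: rest).length : Int) - 1) 1).foldl
                (fun d i => pvInc d (String.ofList (PySem.List.slice (b :: rest) (some i) (some (i + 2)))))
                (pvInc d0 (String.ofList [a, b])) := by
            rw [PySem.List.pyRange_one 1 ((rest.length : Int) + 1),
                PySem.List.pyRange_one 0 (((b :: rest).length : Int) - 1)]
            have he : (((rest.length : Int) + 1) - 1).toNat = ((((b :: rest).length : Int) - 1) - 0).toNat := by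
              simp
            rw [List.foldl_map, List.foldl_map, he]
            apply PySem.List.foldl_congr_mem
            intro d k _
            congr 1
            have h1 : (1 : Int) + (k : Int) = (((k + 1 : Nat)) : Int) := by push_cast; ring
            have h2 : (0 : Int) + (k : Int) = ((k : Nat) : Int) := by ring
            rw [h1, h2, pvSlice_two, pvSlice_two]
            simp [List.drop_succ_cons]
          rw [hshift, ih]
          simp [pvDigs]

-- ===== VERDICT (by name: the statement is the Claim_ definition above) =====
theorem digram_frequency_analysis_spec : Claim_equal_digram_frequency_analysis := by
  intro text _
  unfold Spec_digram_frequency_analysis digram_frequency_analysis digram_frequency_analysis_alt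
  have hA := pvA_fold ((text.toList.filter (fun c => PySem.Chars.isalpha c)).map PySem.Chars.upperChar)
    (PySem.Dict.empty)
  have hB := pvB_fold text.toList PySem.Dict.empty none
  simp only [pvStepA_eq] at *
  rw [hB, pvPairFold_none, ← hA]
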